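-- pv_equiv track=rewrite | github.com/regev-lab/interpretable-splicing-model | figures/figutils.py | landing_pads_to_sw_exons
-- ===== SOURCE A (Python) =====
-- def insert_motif_in_middle_of_sequence(seq_nt, test_motif):
--     seq_nt_copy = list(seq_nt)
--     start_index = int(len(seq_nt) / 2 - len(test_motif) / 2)
--     for j in range(len(test_motif)):
--         seq_nt_copy[start_index + j] = test_motif[j]
--     seq_nt_copy = "".join(seq_nt_copy)
--     return seq_nt_copy
--
-- def landing_pads_to_sw_exons(fourteen_mers, test_motif, prefix="", suffix=""):
--     out = []
--
--     n = len(fourteen_mers)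
--     for i in range(n):
--         tmp = [str(e) for e in fourteen_mers]
--         tmp[i] = insert_motif_in_middle_of_sequence(tmp[i], test_motif)
--         out.append(prefix + "".join(tmp) + suffix)
--     return out
-- ===== SOURCE B (Python) =====
-- def landing_pads_to_sw_exons(fourteen_mers, test_motif, prefix="", suffix=""):
--     strs = [str(e) for e in fourteen_mers]
--     m = len(test_motif)
--     mods = []
--     for s in strs:
--         k = (len(s) - m) // 2
--         mods.append(s[:k] + test_motif + s[k + m:])
--     pres = [""]
--     for s in strs:
--         pres.append(pres[-1] + s)
--     sufs = [""]
--     for s in reversed(strs):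
--         sufs.append(s + sufs[-1])
--     sufs.reverse()
--     return [prefix + pres[i] + mods[i] + sufs[i + 1] + suffix
--             for i in range(len(strs))]
-- ===== Notes on version B (the rewrite author's own statement) =====
-- stated objective: faster
-- what changed: Instead of rebuilding the whole list of strings and re-joining it for every index, B precomputes cumulative prefix-join and suffix-join tables once and builds each output by slicing the i-th element's motif insertion between the precomputed joins (insertion itself done by string slicing instead of per-character assignment).
import Mathlib
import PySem

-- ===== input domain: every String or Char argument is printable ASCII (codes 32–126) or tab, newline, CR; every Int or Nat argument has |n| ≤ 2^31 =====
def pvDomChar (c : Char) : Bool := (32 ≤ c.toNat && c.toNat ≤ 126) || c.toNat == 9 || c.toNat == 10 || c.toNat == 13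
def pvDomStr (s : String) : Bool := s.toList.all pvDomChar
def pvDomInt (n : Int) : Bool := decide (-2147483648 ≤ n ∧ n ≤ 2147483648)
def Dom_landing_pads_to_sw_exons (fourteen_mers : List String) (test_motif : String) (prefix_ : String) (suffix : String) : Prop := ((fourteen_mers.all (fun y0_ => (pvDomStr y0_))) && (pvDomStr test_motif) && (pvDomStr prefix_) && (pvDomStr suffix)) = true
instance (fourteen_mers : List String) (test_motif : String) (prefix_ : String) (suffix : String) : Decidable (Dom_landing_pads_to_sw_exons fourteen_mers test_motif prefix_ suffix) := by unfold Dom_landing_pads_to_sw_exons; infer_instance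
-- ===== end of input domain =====

-- B replaces A's per-iteration full list rebuild + join by one precomputed table of prefix/suffix joins and
-- slice-based motif insertion (objective: faster by a constant factor; return values identical on Pre_).

-- B replaces A's per-iteration full list rebuild + re-join by precomputed cumulative prefix/suffix join
-- tables and slice-based motif insertion (objective: faster sharing of the joins; equal output on Pre_).

-- ===== PORT A =====
-- Python 'a + b' on str, exact (code-point list concatenation)
def pvCat (a b : String) : String := String.ofList (a.toList ++ b.toList)
def pvInsLoop (cs : List Char) (i : Int) (ms : List Char) : List Char :=
  match ms with
  | [] => cs
  | c :: rest => pvInsLoop (PySem.List.pySetD cs i c) (i + 1) rest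
def insert_motif_in_middle_of_sequence (seq_nt : String) (test_motif : String) : String :=
  let start_index : Int :=
    Int.tdiv ((seq_nt.toList.length : Int) - (test_motif.toList.length : Int)) 2
  String.ofList (pvInsLoop seq_nt.toList start_index test_motif.toList)
def landing_pads_to_sw_exons (fourteen_mers : List String) (test_motif : String) (prefix_ : String) (suffix : String) : List String :=
  let n := fourteen_mers.length
  (List.range n).foldl
    (fun (out : List String) (i : Nat) =>
      let tmp := fourteen_mers.map (fun e => e)
      let tmp2 := PySem.List.pySetD tmp (i : Int)
        (insert_motif_in_middle_of_sequence (PySem.List.pyGetD tmp (i : Int) "") test_motif)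
      out ++ [pvCat (pvCat prefix_ (PySem.Str.join "" tmp2)) suffix]) []
-- ===== PORT B =====
-- s[:k] + motif + s[k+m:] with k = (len(s) - m) // 2
def pvInsSlice (s : String) (test_motif : String) : String :=
  let m : Int := (test_motif.toList.length : Int)
  let k : Int := PySem.Int.floordiv ((s.toList.length : Int) - m) 2
  pvCat (pvCat (PySem.Str.slice s none (some k)) test_motif) (PySem.Str.slice s (some (k + m)) none)
def landing_pads_to_sw_exons_alt (fourteen_mers : List String) (test_motif : String) (prefix_ : String) (suffix : String) : List String :=
  let strs := fourteen_mers.map (fun e => e)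
  let mods := strs.foldl (fun acc s => acc ++ [pvInsSlice s test_motif]) []
  let pres := strs.foldl (fun acc s => acc ++ [pvCat (PySem.List.pyGetD acc (-1) "") s]) [""]
  let sufs := (strs.reverse.foldl (fun acc s => acc ++ [pvCat s (PySem.List.pyGetD acc (-1) "")]) [""]).reverse
  (List.range strs.length).map (fun (i : Nat) =>
    pvCat (pvCat (pvCat (pvCat prefix_ (PySem.List.pyGetD pres (i : Int) ""))
      (PySem.List.pyGetD mods (i : Int) "")) (PySem.List.pyGetD sufs ((i : Int) + 1) "")) suffix)


-- ===== PRECONDITION & SPEC =====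
-- Pre_ excludes exactly the inputs on which A raises IndexError: some element shorter than the motif
def Pre_landing_pads_to_sw_exons (fourteen_mers : List String) (test_motif : String) (prefix_ : String) (suffix : String) : Prop :=
  ∀ s ∈ fourteen_mers, test_motif.toList.length ≤ s.toList.length
instance (fourteen_mers : List String) (test_motif : String) (prefix_ : String) (suffix : String) : Decidable (Pre_landing_pads_to_sw_exons fourteen_mers test_motif prefix_ suffix) := by unfold Pre_landing_pads_to_sw_exons; infer_instance

def pvWitness_landing_pads_to_sw_exons : List String × String × String × String :=
  (["ACGTACGTACGTAC", "TTTTGGGGCCCCAA"], "GGTAAG", "AG", "GT")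

def Spec_landing_pads_to_sw_exons (fourteen_mers : List String) (test_motif : String) (prefix_ : String) (suffix : String) (out : List String) : Prop := out = landing_pads_to_sw_exons_alt fourteen_mers test_motif prefix_ suffix
instance (fourteen_mers : List String) (test_motif : String) (prefix_ : String) (suffix : String) (out : List String) : Decidable (Spec_landing_pads_to_sw_exons fourteen_mers test_motif prefix_ suffix out) := by unfold Spec_landing_pads_to_sw_exons; infer_instance

-- ===== CLAIM (what is proved, stated in full; the proofs are below) =====
def Claim_equal_landing_pads_to_sw_exons : Prop := ∀ (fourteen_mers : List String) (test_motif : String) (prefix_ : String) (suffix : String), Dom_landing_pads_to_sw_exons fourteen_mers test_motif prefix_ suffix → Pre_landing_pads_to_sw_exons fourteen_mers test_motif prefix_ suffix → Spec_landing_pads_to_sw_exons fourteen_mers test_motif prefix_ suffix (landing_pads_to_sw_exons fourteen_mers test_motif prefix_ suffix)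

-- ===== LEMMAS AND PROOFS =====

theorem pvInsLoop_eq : ∀ (ms cs : List Char) (k : Nat), k + ms.length ≤ cs.length →
    pvInsLoop cs (k : Int) ms = cs.take k ++ ms ++ cs.drop (k + ms.length) := by
  intro ms
  induction ms with
  | nil => intro cs k h; simp [pvInsLoop]
  | cons c rest ih =>
    intro cs k h
    simp only [List.length_cons] at h
    have hk : k < cs.length := by omega
    rw [pvInsLoop]
    have hset : PySem.List.pySetD cs (k : Int) c = cs.set k c := by
      simp [PySem.List.pySetD_natCast]
    have hcast : ((k : Int) + 1) = ((k + 1 : Nat) : Int) := by push_cast; ring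
    rw [hset, hcast, ih (cs.set k c) (k + 1) (by simp; omega)]
    rw [List.set_eq_take_cons_drop c hk]
    have hlt : cs.take k ++ c :: cs.drop (k + 1) = (cs.take k ++ [c]) ++ cs.drop (k + 1) := by simp
    rw [hlt, List.take_append, List.drop_append]
    have hlen : (cs.take k ++ [c]).length = k + 1 := by simp [List.length_take]; omega
    have h1 : (cs.take k ++ [c]).take (k + 1) = cs.take k ++ [c] :=
      List.take_of_length_le (by rw [hlen])
    have h2 : (cs.take k ++ [c]).drop (k + 1 + rest.length) = [] :=
      List.drop_eq_nil_of_le (by rw [hlen]; omega)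
    rw [h1, h2, hlen]
    have h6 : k + 1 - (k + 1) = 0 := by omega
    have h7 : k + 1 + rest.length - (k + 1) = rest.length := by omega
    rw [h6, h7]
    simp [List.drop_drop]
    congr 1
    omega

theorem pvIns_eq (s tm : String) (h : tm.toList.length ≤ s.toList.length) :
    insert_motif_in_middle_of_sequence s tm = pvInsSlice s tm := by
  unfold insert_motif_in_middle_of_sequence pvInsSlice
  dsimp only
  have hcast : (s.toList.length : Int) - (tm.toList.length : Int)
      = ((s.toList.length - tm.toList.length : Nat) : Int) := by omega
  have htd : Int.tdiv ((s.toList.length : Int) - (tm.toList.length : Int)) 2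
      = (((s.toList.length - tm.toList.length) / 2 : Nat) : Int) := by
    rw [hcast]
    rw [Int.tdiv_eq_ediv_of_nonneg (by positivity)]
    push_cast
    rfl
  have hfd : PySem.Int.floordiv ((s.toList.length : Int) - (tm.toList.length : Int)) 2
      = (((s.toList.length - tm.toList.length) / 2 : Nat) : Int) := by
    rw [PySem.Int.floordiv_eq_ediv_of_pos (by norm_num), hcast]
    push_cast
    rfl
  set k : Nat := (s.toList.length - tm.toList.length) / 2 with hkdef
  have hk : k + tm.toList.length ≤ s.toList.length := by omega
  rw [htd, hfd, pvInsLoop_eq tm.toList s.toList k hk]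
  unfold pvCat
  have hsl1 : (PySem.Str.slice s none (some (k : Int))).toList = s.toList.take k := by
    rw [PySem.Str.toList_slice, PySem.Chars.slice_eq_listSlice, PySem.List.slice_to]
    congr 1
    omega
  have hsl2 : (PySem.Str.slice s (some ((k : Int) + (tm.toList.length : Int))) none).toList
      = s.toList.drop (k + tm.toList.length) := by
    rw [PySem.Str.toList_slice, PySem.Chars.slice_eq_listSlice, PySem.List.slice_from]
    congr 1
    omega
  simp only [String.toList_ofList, hsl1, hsl2]

def joinL (ss : List String) : List Char := (ss.map String.toList).flatten

theorem joinChars_flatten : ∀ ps : List (List Char), PySem.Chars.join [] ps = ps.flatten := by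
  intro ps
  induction ps with
  | nil => rfl
  | cons a t ih =>
    cases t with
    | nil => simp [PySem.Chars.join_singleton]
    | cons b u => rw [PySem.Chars.join_cons_cons]; simp_all

theorem strJoin_toList (l : List String) : (PySem.Str.join "" l).toList = joinL l := by
  simp [PySem.Str.join, joinChars_flatten, joinL]

theorem pyGetD_last (p : List String) (y d : String) : PySem.List.pyGetD (p ++ [y]) (-1) d = y := by
  simp [PySem.List.pyGetD, PySem.List.pyGet?, PySem.List.pyIdx?]

theorem pres_loop : ∀ (l p : List String) (x : String), PySem.List.pyGetD p (-1) "" = x →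
    l.foldl (fun acc s => acc ++ [pvCat (PySem.List.pyGetD acc (-1) "") s]) p
      = p ++ (List.range l.length).map
          (fun j => String.ofList (x.toList ++ joinL (l.take (j + 1)))) := by
  intro l
  induction l with
  | nil => intro p x _; simp
  | cons s t ih =>
    intro p x hx
    rw [List.foldl_cons, hx, ih (p ++ [pvCat x s]) (pvCat x s) (pyGetD_last p _ _)]
    rw [List.length_cons, List.range_succ_eq_map]
    simp [List.map_map, Function.comp_def, pvCat, joinL, List.append_assoc]

theorem sufs_loop : ∀ (l p : List String) (x : String), PySem.List.pyGetD p (-1) "" = x →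
    l.foldl (fun acc s => acc ++ [pvCat s (PySem.List.pyGetD acc (-1) "")]) p
      = p ++ (List.range l.length).map
          (fun j => String.ofList (joinL ((l.take (j + 1)).reverse) ++ x.toList)) := by
  intro l
  induction l with
  | nil => intro p x _; simp
  | cons s t ih =>
    intro p x hx
    rw [List.foldl_cons, hx, ih (p ++ [pvCat s x]) (pvCat s x) (pyGetD_last p _ _)]
    rw [List.length_cons, List.range_succ_eq_map]
    simp [List.map_map, Function.comp_def, pvCat, joinL, List.append_assoc]

theorem pres_char (strs : List String) :
    strs.foldl (fun acc s => acc ++ [pvCat (PySem.List.pyGetD acc (-1) "") s]) [""]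
      = (List.range (strs.length + 1)).map (fun i => String.ofList (joinL (strs.take i))) := by
  rw [pres_loop strs [""] "" (by rfl)]
  rw [List.range_succ_eq_map]
  simp [List.map_map, Function.comp_def]
  rfl

theorem sufs_getD (strs : List String) (i : Nat) (hi : i < strs.length) :
    PySem.List.pyGetD
      ((strs.reverse.foldl (fun acc s => acc ++ [pvCat s (PySem.List.pyGetD acc (-1) "")]) [""]).reverse)
      ((i : Int) + 1) ""
      = String.ofList (joinL (strs.drop (i + 1))) := by
  rw [sufs_loop strs.reverse [""] "" (by rfl)]
  have hc : ((i : Int) + 1) = ((i + 1 : Nat) : Int) := by push_cast; ring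
  rw [hc]
  simp only [PySem.List.pyGetD_natCast]
  rw [List.getD_eq_getElem?_getD]
  rw [List.getElem?_reverse (by simp; omega)]
  have hlen : ([""] ++ (List.range strs.reverse.length).map
      (fun j => String.ofList (joinL ((strs.reverse.take (j + 1)).reverse) ++ "".toList))).length
      = strs.length + 1 := by simp
  rw [hlen]
  by_cases hlast : i = strs.length - 1
  · have h0 : strs.length + 1 - 1 - (i + 1) = 0 := by omega
    rw [h0]
    have hd : strs.drop (i + 1) = [] := by
      apply List.drop_eq_nil_of_le; omega
    rw [hd]
    rfl
  · have h0 : strs.length + 1 - 1 - (i + 1) = (strs.length - i - 2) + 1 := by omega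
    rw [h0]
    rw [List.getElem?_append_right (by simp)]
    simp only [List.length_cons, List.length_nil, Nat.add_sub_cancel]
    rw [List.getElem?_map]
    rw [List.getElem?_range (by simp; omega)]
    have ht : strs.reverse.take (strs.length - i - 2 + 1) = (strs.drop (i + 1)).reverse := by
      have hj : strs.length - i - 2 + 1 = strs.length - (i + 1) := by omega
      have hj2 : strs.length - (strs.length - (i + 1)) = i + 1 := by omega
      rw [hj, List.take_reverse, hj2]
    simp only [Option.map_some, Option.getD_some]
    rw [ht]
    simp

theorem joinL_set (l : List String) (i : Nat) (v : String) (h : i < l.length) :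
    joinL (l.set i v) = joinL (l.take i) ++ v.toList ++ joinL (l.drop (i + 1)) := by
  rw [List.set_eq_take_cons_drop v h]
  simp [joinL, List.append_assoc]

theorem pv_main (fms : List String) (tm p sfx : String)
    (hpre : ∀ s ∈ fms, tm.toList.length ≤ s.toList.length) :
    landing_pads_to_sw_exons fms tm p sfx = landing_pads_to_sw_exons_alt fms tm p sfx := by
  unfold landing_pads_to_sw_exons landing_pads_to_sw_exons_alt
  dsimp only
  simp only [List.map_id']
  simp only [PySem.List.foldl_append_singleton_eq_map, List.nil_append]
  rw [pres_char]
  apply List.ext_getElem (by simp)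
  intro i h1 h2
  have hi : i < fms.length := by simpa using h1
  simp only [List.getElem_map, List.getElem_range]
  have hget : PySem.List.pyGetD fms (i : Int) "" = fms[i] := by
    simp only [PySem.List.pyGetD_natCast]
    rw [List.getD_eq_getElem?_getD, List.getElem?_eq_getElem hi]
    rfl
  have hset : PySem.List.pySetD fms (i : Int) (insert_motif_in_middle_of_sequence fms[i] tm)
      = fms.set i (insert_motif_in_middle_of_sequence fms[i] tm) := by
    simp [PySem.List.pySetD_natCast]
  rw [hget, hset, pvIns_eq fms[i] tm (hpre _ (List.getElem_mem hi))]
  have hpres : PySem.List.pyGetD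
      ((List.range (fms.length + 1)).map (fun j => String.ofList (joinL (fms.take j)))) (i : Int) ""
      = String.ofList (joinL (fms.take i)) := by
    simp only [PySem.List.pyGetD_natCast]
    rw [List.getD_eq_getElem?_getD, List.getElem?_eq_getElem (by simp; omega)]
    simp
  have hmods : PySem.List.pyGetD (fms.map (fun s => pvInsSlice s tm)) (i : Int) ""
      = pvInsSlice fms[i] tm := by
    simp only [PySem.List.pyGetD_natCast]
    rw [List.getD_eq_getElem?_getD, List.getElem?_eq_getElem (by simp; omega)]
    simp
  rw [hpres, hmods, sufs_getD fms i hi]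
  unfold pvCat
  apply congrArg
  simp only [String.toList_ofList, strJoin_toList, List.append_assoc]
  rw [joinL_set fms i _ hi]
  simp [List.append_assoc]

-- ===== VERDICT (by name: the statement is the Claim_ definition above) =====
theorem landing_pads_to_sw_exons_spec : Claim_equal_landing_pads_to_sw_exons := by
  intro fms tm p s _ hpre
  unfold Spec_landing_pads_to_sw_exons
  exact pv_main fms tm p s hpre
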